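-- pv_equiv track=rewrite | github.com/jshorwitz/synter | apps/services/competitor_snapshot_generator.py | _analyze_messaging_patterns
-- ===== SOURCE A (Python) =====
-- from typing import Dict, List, Optional
--
-- def _analyze_messaging_patterns(ad_copies: List[Dict]) -> List[str]:
--     """Analyze messaging patterns in competitor ads."""
--     patterns = []
--
--     if not ad_copies:
--         return patterns
--
--     # Common patterns to look for
--     pattern_checks = [
--         ('Free Trial', lambda ad: 'free' in ad.get('title', '').lower() or 'trial' in ad.get('description', '').lower()),
--         ('Call to Action', lambda ad: any(cta in ad.get('description', '').lower() for cta in ['start', 'get started', 'try', 'learn more'])),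
--         ('Benefits Focus', lambda ad: any(benefit in ad.get('title', '').lower() for benefit in ['improve', 'increase', 'boost', 'enhance'])),
--         ('Problem Solution', lambda ad: any(problem in ad.get('description', '').lower() for problem in ['solution', 'solve', 'fix', 'address'])),
--         ('Social Proof', lambda ad: any(proof in ad.get('description', '').lower() for proof in ['trusted', 'proven', 'thousands', 'leading']))
--     ]
--
--     for pattern_name, check_func in pattern_checks:
--         if any(check_func(ad) for ad in ad_copies):
--             patterns.append(pattern_name)
--
--     return patterns
-- ===== SOURCE B (Python) =====
-- from typing import Dict, List, Optional
--
-- def _analyze_messaging_patterns(ad_copies: List[Dict]) -> List[str]: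
--     """Single pass over the ads collecting matched pattern names into a set,
--     then emit the names in the fixed declaration order."""
--     matched = set()
--     for ad in ad_copies:
--         title = ad.get('title', '').lower()
--         desc = ad.get('description', '').lower()
--         if 'free' in title or 'trial' in desc:
--             matched.add('Free Trial')
--         if any(k in desc for k in ('start', 'get started', 'try', 'learn more')):
--             matched.add('Call to Action')
--         if any(k in title for k in ('improve', 'increase', 'boost', 'enhance')):
--             matched.add('Benefits Focus')
--         if any(k in desc for k in ('solution', 'solve', 'fix', 'address')):
--             matched.add('Problem Solution')
--         if any(k in desc for k in ('trusted', 'proven', 'thousands', 'leading')):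
--             matched.add('Social Proof')
--     return [name for name in ('Free Trial', 'Call to Action', 'Benefits Focus',
--                               'Problem Solution', 'Social Proof') if name in matched]
-- ===== Notes on version B (the rewrite author's own statement) =====
-- stated objective: alternative
-- what changed: B makes a single pass over ad_copies, collecting the names of matched patterns into a set per-ad, and then emits the five pattern names in declaration order filtered by set membership, instead of A's five per-pattern scans each re-traversing the whole ad list.
import Mathlib
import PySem

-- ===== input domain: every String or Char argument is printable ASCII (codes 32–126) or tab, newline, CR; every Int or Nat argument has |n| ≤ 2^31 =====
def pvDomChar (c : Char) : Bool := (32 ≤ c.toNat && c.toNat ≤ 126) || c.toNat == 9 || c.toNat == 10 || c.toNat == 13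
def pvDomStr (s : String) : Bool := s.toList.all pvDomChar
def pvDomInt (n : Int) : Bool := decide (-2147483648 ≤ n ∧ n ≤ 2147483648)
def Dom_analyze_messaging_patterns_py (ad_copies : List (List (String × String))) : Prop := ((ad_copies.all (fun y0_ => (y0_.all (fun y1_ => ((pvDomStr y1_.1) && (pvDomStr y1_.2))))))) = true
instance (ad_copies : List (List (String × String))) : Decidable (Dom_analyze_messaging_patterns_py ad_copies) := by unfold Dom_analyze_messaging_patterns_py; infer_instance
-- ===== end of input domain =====

-- B re-implements the five-pattern analysis with a single pass over the ads collecting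
-- matched pattern names into a set, then emitting the names in declaration order
-- (objective: alternative decomposition; return value provably identical to A's).

-- ===== PORT A =====
-- A's lambdas: ad.get('title'/'description', '').lower() and the keyword checks
def pvATitle (ad : List (String × String)) : String :=
  PySem.Str.lower ((PySem.Dict.mk ad).getD "title" "")

def pvADesc (ad : List (String × String)) : String :=
  PySem.Str.lower ((PySem.Dict.mk ad).getD "description" "")

def pvCheckFree (ad : List (String × String)) : Bool :=
  PySem.Str.isIn "free" (pvATitle ad) || PySem.Str.isIn "trial" (pvADesc ad)

def pvCheckCTA (ad : List (String × String)) : Bool :=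
  (["start", "get started", "try", "learn more"]).any (fun c => PySem.Str.isIn c (pvADesc ad))

def pvCheckBenefit (ad : List (String × String)) : Bool :=
  (["improve", "increase", "boost", "enhance"]).any (fun b => PySem.Str.isIn b (pvATitle ad))

def pvCheckProblem (ad : List (String × String)) : Bool :=
  (["solution", "solve", "fix", "address"]).any (fun p => PySem.Str.isIn p (pvADesc ad))

def pvCheckProof (ad : List (String × String)) : Bool :=
  (["trusted", "proven", "thousands", "leading"]).any (fun p => PySem.Str.isIn p (pvADesc ad))

-- A: early return on empty, then one pass over the five (name, check) pairs,
-- each pass scanning the whole ad list with `any`.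
def analyze_messaging_patterns_py (ad_copies : List (List (String × String))) : List String :=
  if ad_copies = [] then []
  else
    ([("Free Trial", pvCheckFree), ("Call to Action", pvCheckCTA),
      ("Benefits Focus", pvCheckBenefit), ("Problem Solution", pvCheckProblem),
      ("Social Proof", pvCheckProof)] :
      List (String × (List (String × String) → Bool))).foldl
      (fun patterns pc => if ad_copies.any pc.2 then patterns ++ [pc.1] else patterns) []

-- ===== PORT B =====
-- B's per-ad access and keyword test (any(k in s for k in keys))
def pvBTitle (ad : List (String × String)) : String :=
  PySem.Str.lower ((PySem.Dict.mk ad).getD "title" "")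

def pvBDesc (ad : List (String × String)) : String :=
  PySem.Str.lower ((PySem.Dict.mk ad).getD "description" "")

def pvHasAny (keys : List String) (s : String) : Bool :=
  keys.any (fun k => PySem.Str.isIn k s)

-- matched.add(name) guarded by the pattern test
def pvAddIf (name : String) (b : Bool) (s : PySem.Set String) : PySem.Set String :=
  if b then PySem.Set.add s name else s

-- B's per-ad step: test the ad against every pattern, adding matched names to the set
def pvMatchAd (s : PySem.Set String) (ad : List (String × String)) : PySem.Set String :=
  pvAddIf "Social Proof" (pvHasAny ["trusted", "proven", "thousands", "leading"] (pvBDesc ad))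
    (pvAddIf "Problem Solution" (pvHasAny ["solution", "solve", "fix", "address"] (pvBDesc ad))
      (pvAddIf "Benefits Focus" (pvHasAny ["improve", "increase", "boost", "enhance"] (pvBTitle ad))
        (pvAddIf "Call to Action" (pvHasAny ["start", "get started", "try", "learn more"] (pvBDesc ad))
          (pvAddIf "Free Trial" (PySem.Str.isIn "free" (pvBTitle ad) || PySem.Str.isIn "trial" (pvBDesc ad)) s))))

-- B: one fold over the ads building the matched-name set, then filter the
-- fixed name list by membership in the set.
def analyze_messaging_patterns_py_alt (ad_copies : List (List (String × String))) : List String :=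
  let matched := ad_copies.foldl pvMatchAd PySem.Set.empty
  (["Free Trial", "Call to Action", "Benefits Focus", "Problem Solution", "Social Proof"]).filter
    (fun name => PySem.Set.contains matched name)

-- ===== PRECONDITION & SPEC =====
def Spec_analyze_messaging_patterns_py (ad_copies : List (List (String × String))) (out : List String) : Prop := out = analyze_messaging_patterns_py_alt ad_copies
instance (ad_copies : List (List (String × String))) (out : List String) : Decidable (Spec_analyze_messaging_patterns_py ad_copies out) := by unfold Spec_analyze_messaging_patterns_py; infer_instance

-- ===== CLAIM (what is proved, stated in full; the proofs are below) =====
def Claim_equal_analyze_messaging_patterns_py : Prop := ∀ (ad_copies : List (List (String × String))), Dom_analyze_messaging_patterns_py ad_copies → Spec_analyze_messaging_patterns_py ad_copies (analyze_messaging_patterns_py ad_copies)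

-- ===== LEMMAS AND PROOFS =====

theorem pv_mem_addIf (m : String) (b : Bool) (s : PySem.Set String) (n : String) :
    n ∈ pvAddIf m b s ↔ n ∈ s ∨ (n = m ∧ b = true) := by
  unfold pvAddIf
  cases b <;> simp [PySem.Set.mem_add]

-- B's per-ad tests coincide with A's lambdas (same code, B's helper names)
theorem pv_chk_free (ad : List (String × String)) :
    (PySem.Str.isIn "free" (pvBTitle ad) || PySem.Str.isIn "trial" (pvBDesc ad)) = pvCheckFree ad := by
  unfold pvBTitle pvBDesc pvCheckFree pvATitle pvADesc; rfl
theorem pv_chk_cta (ad : List (String × String)) :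
    pvHasAny ["start", "get started", "try", "learn more"] (pvBDesc ad) = pvCheckCTA ad := by
  unfold pvHasAny pvBDesc pvCheckCTA pvADesc; rfl
theorem pv_chk_benefit (ad : List (String × String)) :
    pvHasAny ["improve", "increase", "boost", "enhance"] (pvBTitle ad) = pvCheckBenefit ad := by
  unfold pvHasAny pvBTitle pvCheckBenefit pvATitle; rfl
theorem pv_chk_problem (ad : List (String × String)) :
    pvHasAny ["solution", "solve", "fix", "address"] (pvBDesc ad) = pvCheckProblem ad := by
  unfold pvHasAny pvBDesc pvCheckProblem pvADesc; rfl
theorem pv_chk_proof (ad : List (String × String)) :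
    pvHasAny ["trusted", "proven", "thousands", "leading"] (pvBDesc ad) = pvCheckProof ad := by
  unfold pvHasAny pvBDesc pvCheckProof pvADesc; rfl

-- for a fixed pattern name, one per-ad step adds it exactly when its check fires
theorem pv_fold_mem (name : String) (chk : List (String × String) → Bool)
    (hstep : ∀ (s : PySem.Set String) (ad : List (String × String)),
      name ∈ pvMatchAd s ad ↔ name ∈ s ∨ chk ad = true) :
    ∀ (ads : List (List (String × String))) (s : PySem.Set String),
      name ∈ ads.foldl pvMatchAd s ↔ name ∈ s ∨ ads.any chk = true := by
  intro ads
  induction ads with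
  | nil => simp
  | cons a t ih =>
    intro s
    simp only [List.foldl_cons, List.any_cons, ih, hstep, Bool.or_eq_true]
    tauto

-- …hence membership of the full fold (from the empty set) is the Set.contains test
theorem pv_fold_contains (name : String) (chk : List (String × String) → Bool)
    (hstep : ∀ (s : PySem.Set String) (ad : List (String × String)),
      name ∈ pvMatchAd s ad ↔ name ∈ s ∨ chk ad = true)
    (ads : List (List (String × String))) :
    PySem.Set.contains (ads.foldl pvMatchAd PySem.Set.empty) name = ads.any chk := by
  have h := pv_fold_mem name chk hstep ads PySem.Set.empty
  rcases hc : ads.any chk with _ | _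
  · rcases hb : PySem.Set.contains (ads.foldl pvMatchAd PySem.Set.empty) name with _ | _
    · rfl
    · have := h.mp ((PySem.Set.contains_iff _ name).mp hb)
      simp_all [PySem.Set.empty]
  · exact (PySem.Set.contains_iff _ name).mpr (h.mpr (Or.inr hc))

theorem pv_step_free (s : PySem.Set String) (ad : List (String × String)) :
    "Free Trial" ∈ pvMatchAd s ad ↔ "Free Trial" ∈ s ∨ pvCheckFree ad = true := by
  unfold pvMatchAd
  rw [pv_chk_free]
  simp [pv_mem_addIf]
theorem pv_step_cta (s : PySem.Set String) (ad : List (String × String)) :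
    "Call to Action" ∈ pvMatchAd s ad ↔ "Call to Action" ∈ s ∨ pvCheckCTA ad = true := by
  unfold pvMatchAd
  rw [pv_chk_cta]
  simp [pv_mem_addIf]
theorem pv_step_benefit (s : PySem.Set String) (ad : List (String × String)) :
    "Benefits Focus" ∈ pvMatchAd s ad ↔ "Benefits Focus" ∈ s ∨ pvCheckBenefit ad = true := by
  unfold pvMatchAd
  rw [pv_chk_benefit]
  simp [pv_mem_addIf]
theorem pv_step_problem (s : PySem.Set String) (ad : List (String × String)) :
    "Problem Solution" ∈ pvMatchAd s ad ↔ "Problem Solution" ∈ s ∨ pvCheckProblem ad = true := by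
  unfold pvMatchAd
  rw [pv_chk_problem]
  simp [pv_mem_addIf]
theorem pv_step_proof (s : PySem.Set String) (ad : List (String × String)) :
    "Social Proof" ∈ pvMatchAd s ad ↔ "Social Proof" ∈ s ∨ pvCheckProof ad = true := by
  unfold pvMatchAd
  rw [pv_chk_proof]
  simp [pv_mem_addIf]

-- evaluating A's five-pair fold with the checks abstracted
theorem pvA_eval {γ : Type} (ads : List γ) (f1 f2 f3 f4 f5 : γ → Bool) :
    ([("Free Trial", f1), ("Call to Action", f2), ("Benefits Focus", f3),
      ("Problem Solution", f4), ("Social Proof", f5)] : List (String × (γ → Bool))).foldl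
      (fun patterns pc => if ads.any pc.2 then patterns ++ [pc.1] else patterns) [] =
    ((if ads.any f1 then ["Free Trial"] else []) ++ (if ads.any f2 then ["Call to Action"] else []) ++
     (if ads.any f3 then ["Benefits Focus"] else []) ++ (if ads.any f4 then ["Problem Solution"] else []) ++
     (if ads.any f5 then ["Social Proof"] else [])) := by
  simp only [List.foldl_cons, List.foldl_nil]
  cases ads.any f1 <;> cases ads.any f2 <;> cases ads.any f3 <;> cases ads.any f4 <;> cases ads.any f5 <;> rfl

-- evaluating B's filter of the five names with the matched set abstracted
theorem pvB_eval (m : PySem.Set String) :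
    (["Free Trial", "Call to Action", "Benefits Focus", "Problem Solution", "Social Proof"]).filter
      (fun name => PySem.Set.contains m name) =
    ((if PySem.Set.contains m "Free Trial" then ["Free Trial"] else []) ++ (if PySem.Set.contains m "Call to Action" then ["Call to Action"] else []) ++
     (if PySem.Set.contains m "Benefits Focus" then ["Benefits Focus"] else []) ++ (if PySem.Set.contains m "Problem Solution" then ["Problem Solution"] else []) ++
     (if PySem.Set.contains m "Social Proof" then ["Social Proof"] else [])) := by
  simp only [List.filter_cons, List.filter_nil]
  cases PySem.Set.contains m "Free Trial" <;> cases PySem.Set.contains m "Call to Action" <;>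
    cases PySem.Set.contains m "Benefits Focus" <;> cases PySem.Set.contains m "Problem Solution" <;>
    cases PySem.Set.contains m "Social Proof" <;> rfl

-- ===== VERDICT (by name: the statement is the Claim_ definition above) =====
set_option maxHeartbeats 1000000 in
theorem analyze_messaging_patterns_py_spec : Claim_equal_analyze_messaging_patterns_py := by
  intro ads _
  show analyze_messaging_patterns_py ads = analyze_messaging_patterns_py_alt ads
  unfold analyze_messaging_patterns_py analyze_messaging_patterns_py_alt
  rw [pvA_eval, pvB_eval,
    pv_fold_contains "Free Trial" pvCheckFree pv_step_free ads,
    pv_fold_contains "Call to Action" pvCheckCTA pv_step_cta ads,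
    pv_fold_contains "Benefits Focus" pvCheckBenefit pv_step_benefit ads,
    pv_fold_contains "Problem Solution" pvCheckProblem pv_step_problem ads,
    pv_fold_contains "Social Proof" pvCheckProof pv_step_proof ads]
  by_cases h : ads = []
  · subst h; rfl
  · rw [if_neg h]
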